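-- pv_equiv track=rewrite | github.com/jasonacox/tinytuya | regression/regression_test.py | select_devices_by_version
-- ===== SOURCE A (Python) =====
-- from typing import List, Dict, Any, Tuple
--
-- def select_devices_by_version(devices: List[Dict[str, Any]], versions_wanted: List[str] = None) -> List[Dict[str, Any]]:
--     """Select one representative device from each version for testing"""
--     if versions_wanted is None:
--         # Auto-detect all available versions
--         versions_wanted = list(set(device.get('version', device.get('ver', '3.3')) for device in devices))
--         versions_wanted.sort()
--
--     version_devices = {}
--     for device in devices:
--         version = device.get('version', device.get('ver', '3.3'))
--         if version in versions_wanted: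
--             if version not in version_devices:
--                 version_devices[version] = []
--             version_devices[version].append(device)
--
--     # Select one device from each version (prefer devices with simpler names)
--     selected_devices = []
--     for version in sorted(version_devices.keys()):
--         # Sort by name length to prefer simpler device names
--         candidates = sorted(version_devices[version], key=lambda d: len(d['name']))
--         selected_devices.append(candidates[0])
--
--     return selected_devices
-- ===== SOURCE B (Python) =====
-- from typing import List, Dict, Any
--
-- def select_devices_by_version(devices: List[Dict[str, Any]], versions_wanted: List[str] = None) -> List[Dict[str, Any]]:
--     """Select one representative device from each version for testing.
--
--     Different decomposition: no grouping dict and no per-group sort; filter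
--     the pool once, then for each distinct version (ascending) make one linear
--     scan keeping the running shortest-named device (strict '<' keeps the
--     first-seen device on ties, matching the original's stable sort)."""
--     def ver(d):
--         return d.get('version', d.get('ver', '3.3'))
--
--     if versions_wanted is None:
--         pool = devices
--     else:
--         pool = [d for d in devices if ver(d) in versions_wanted]
--
--     selected = []
--     for v in sorted(set(ver(d) for d in pool)):
--         best = None
--         for d in pool:
--             if ver(d) == v and (best is None or len(d['name']) < len(best['name'])):
--                 best = d
--         if best is not None:
--             selected.append(best)
--     return selected
-- ===== Notes on version B (the rewrite author's own statement) =====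
-- stated objective: alternative
-- what changed: Replaces the dict-of-candidate-lists grouping plus per-group sort by: filter the pool once, then for each distinct version in ascending order run one linear scan keeping the running shortest-named device (strict <).
import Mathlib
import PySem

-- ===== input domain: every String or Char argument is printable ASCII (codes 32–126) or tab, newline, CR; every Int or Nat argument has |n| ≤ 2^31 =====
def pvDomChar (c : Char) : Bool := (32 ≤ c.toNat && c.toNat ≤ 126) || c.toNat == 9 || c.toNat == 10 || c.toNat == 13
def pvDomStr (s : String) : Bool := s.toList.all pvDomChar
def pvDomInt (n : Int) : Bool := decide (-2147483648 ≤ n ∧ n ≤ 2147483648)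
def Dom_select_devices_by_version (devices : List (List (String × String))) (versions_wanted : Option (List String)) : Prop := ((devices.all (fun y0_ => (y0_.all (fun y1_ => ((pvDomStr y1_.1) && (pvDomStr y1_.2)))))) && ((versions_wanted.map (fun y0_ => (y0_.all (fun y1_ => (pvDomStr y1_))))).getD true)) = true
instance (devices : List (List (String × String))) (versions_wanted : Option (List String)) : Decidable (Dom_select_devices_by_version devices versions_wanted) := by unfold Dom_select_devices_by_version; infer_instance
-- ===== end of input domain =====

-- ===== PORT A =====
-- B drops A's dict-of-candidate-lists and per-group sort: it filters the pool once and
-- runs one linear min-scan per distinct version (strict <); return value only.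
-- A-side helpers
def pvVer (d : List (String × String)) : String :=
  PySem.Dict.getD ⟨d⟩ "version" (PySem.Dict.getD ⟨d⟩ "ver" "3.3")

def pvNameLen (d : List (String × String)) : Int :=
  PySem.Str.len (PySem.Dict.getD ⟨d⟩ "name" "")

def pvWanted (devices : List (List (String × String))) (versions_wanted : Option (List String)) : List String :=
  match versions_wanted with
  | none => PySem.List.sorted (PySem.Set.ofList (devices.map pvVer)) (fun v => v)
  | some vs => vs

def pvStepA (vw : List String) (vd : PySem.Dict String (List (List (String × String)))) (device : List (String × String)) : PySem.Dict String (List (List (String × String))) :=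
  let version := pvVer device
  if version ∈ vw then
    let vd1 := if vd.contains version then vd else vd.insert version []
    vd1.modify version [] (fun g => g ++ [device])
  else vd

def select_devices_by_version (devices : List (List (String × String))) (versions_wanted : Option (List String)) : List (List (String × String)) :=
  let vw := pvWanted devices versions_wanted
  let vd := devices.foldl (pvStepA vw) PySem.Dict.empty
  (PySem.List.sorted vd.keys (fun v => v)).foldl (fun selected version =>
    match PySem.List.sorted (vd.getD version []) pvNameLen with
    | c :: _ => selected ++ [c]
    | [] => selected) []

-- ===== PORT B =====
def pvPool (devices : List (List (String × String))) (versions_wanted : Option (List String)) : List (List (String × String)) :=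
  match versions_wanted with
  | none => devices
  | some vs => devices.filter (fun d => decide (pvVer d ∈ vs))

def pvScanMin (v : String) (best : Option (List (String × String))) (d : List (String × String)) : Option (List (String × String)) :=
  if (pvVer d == v) && (match best with | none => true | some b => decide (pvNameLen d < pvNameLen b))
  then some d else best

def select_devices_by_version_alt (devices : List (List (String × String))) (versions_wanted : Option (List String)) : List (List (String × String)) :=
  let pool := pvPool devices versions_wanted
  (PySem.List.sorted (PySem.Set.ofList (pool.map pvVer)) (fun v => v)).foldl
    (fun selected v =>
      match pool.foldl (pvScanMin v) none with
      | some best => selected ++ [best]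
      | none => selected) []

-- ===== PRECONDITION & SPEC =====
def pvSelectedB (versions_wanted : Option (List String)) (d : List (String × String)) : Bool :=
  match versions_wanted with
  | none => true
  | some vs => decide (pvVer d ∈ vs)

-- Pre_ excludes exactly the inputs where the Python A raises KeyError: some device
-- whose version gets grouped (all of them when versions_wanted is None) has no 'name' key.
def Pre_select_devices_by_version (devices : List (List (String × String))) (versions_wanted : Option (List String)) : Prop :=
  ∀ d ∈ devices, pvSelectedB versions_wanted d = true → PySem.Dict.contains (PySem.Dict.mk d) "name" = true
instance (devices : List (List (String × String))) (versions_wanted : Option (List String)) : Decidable (Pre_select_devices_by_version devices versions_wanted) := by unfold Pre_select_devices_by_version; infer_instance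

def pvWitness_select_devices_by_version : (List (List (String × String))) × Option (List String) :=
  ([[("name", "a"), ("ver", "3.3")], [("name", "bb"), ("version", "3.1")]], none)

def Spec_select_devices_by_version (devices : List (List (String × String))) (versions_wanted : Option (List String)) (out : List (List (String × String))) : Prop := out = select_devices_by_version_alt devices versions_wanted
instance (devices : List (List (String × String))) (versions_wanted : Option (List String)) (out : List (List (String × String))) : Decidable (Spec_select_devices_by_version devices versions_wanted out) := by unfold Spec_select_devices_by_version; infer_instance

-- ===== CLAIM (what is proved, stated in full; the proofs are below) =====
def Claim_equal_select_devices_by_version : Prop := ∀ (devices : List (List (String × String))) (versions_wanted : Option (List String)), Dom_select_devices_by_version devices versions_wanted → Pre_select_devices_by_version devices versions_wanted → Spec_select_devices_by_version devices versions_wanted (select_devices_by_version devices versions_wanted)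

-- ===== LEMMAS AND PROOFS =====
def pvGroup (vw : List String) (v : String) (l : List (List (String × String))) : List (List (String × String)) :=
  l.filter (fun x => decide (pvVer x ∈ vw) && (pvVer x == v))

def pvMinStep (acc : Option (List (String × String))) (x : List (String × String)) : Option (List (String × String)) :=
  match acc with
  | none => some x
  | some m => if pvNameLen x < pvNameLen m then some x else some m

lemma stepA_getD (vw vd device v) :
    (pvStepA vw vd device).getD v [] =
      if pvVer device ∈ vw ∧ pvVer device = v then vd.getD v [] ++ [device] else vd.getD v [] := by
  unfold pvStepA
  by_cases hin : pvVer device ∈ vw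
  · simp only [hin, if_true, true_and]
    by_cases hc : vd.contains (pvVer device)
    · simp only [hc, if_true, PySem.Dict.modify, PySem.Dict.getD_insert]
      by_cases hv : v = pvVer device
      · subst hv; simp
      · have hv' : ¬ pvVer device = v := fun h => hv h.symm
        simp [hv, hv']
    · simp only [hc, if_false, Bool.false_eq_true, PySem.Dict.modify]
      by_cases hv : v = pvVer device
      · subst hv
        simp [PySem.Dict.getD_of_not_contains _ _ (by simpa using hc)]
      · have hv' : ¬ pvVer device = v := fun h => hv h.symm
        simp [PySem.Dict.getD_insert, hv, hv']
  · simp [hin]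

lemma a_fold_getD (vw : List String) (l : List (List (String × String))) (d : PySem.Dict String (List (List (String × String)))) (v : String) :
    (l.foldl (pvStepA vw) d).getD v [] = d.getD v [] ++ pvGroup vw v l := by
  induction l generalizing d with
  | nil => simp [pvGroup]
  | cons a t ih =>
    rw [List.foldl_cons, ih, stepA_getD]
    unfold pvGroup
    by_cases h : pvVer a ∈ vw ∧ pvVer a = v
    · obtain ⟨h1, h2⟩ := h
      subst h2
      simp [h1]
    · rw [if_neg h]
      rcases Decidable.not_and_iff_or_not.mp h with h1 | h1 <;> simp [h1]

lemma stepA_keys (vw vd device) :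
    (pvStepA vw vd device).keys =
      if pvVer device ∈ vw then PySem.Set.add vd.keys (pvVer device) else vd.keys := by
  unfold pvStepA
  by_cases hin : pvVer device ∈ vw
  · simp only [hin, if_true]
    by_cases hc : vd.contains (pvVer device)
    · rw [PySem.Set.add_of_mem ((PySem.Dict.contains_iff_mem_keys _ _).mp hc)]
      simp only [PySem.Dict.modify, if_pos hc]
      exact PySem.Dict.keys_insert_of_contains _ _ hc
    · have hc' : vd.contains (pvVer device) = false := by simpa using hc
      rw [PySem.Set.add_of_not_mem (fun hm => hc ((PySem.Dict.contains_iff_mem_keys _ _).mpr hm))]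
      simp only [PySem.Dict.modify, if_neg hc]
      rw [PySem.Dict.keys_insert_of_contains _ _ (PySem.Dict.contains_insert_self _ _ _),
          PySem.Dict.keys_insert_of_not_contains _ _ hc']
  · simp [hin]

lemma a_fold_keys (vw : List String) (l : List (List (String × String))) (d : PySem.Dict String (List (List (String × String)))) :
    (l.foldl (pvStepA vw) d).keys = PySem.Set.update d.keys ((l.filter (fun x => decide (pvVer x ∈ vw))).map pvVer) := by
  induction l generalizing d with
  | nil => simp [PySem.Set.update]
  | cons a t ih =>
    rw [List.foldl_cons, ih]
    by_cases hin : pvVer a ∈ vw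
    · rw [List.filter_cons_of_pos (by simpa using hin), List.map_cons, PySem.Set.update_cons,
        stepA_keys, if_pos hin]
    · rw [List.filter_cons_of_neg (by simpa using hin), stepA_keys, if_neg hin]

lemma scanMin_eq (v : String) (best : Option (List (String × String))) (d : List (String × String)) :
    pvScanMin v best d = if pvVer d = v then pvMinStep best d else best := by
  unfold pvScanMin pvMinStep
  by_cases hv : pvVer d = v
  · cases best with
    | none => simp [hv]
    | some b =>
      by_cases hl : pvNameLen d < pvNameLen b <;> simp [hv, hl]
  · cases best <;> simp [hv]

lemma b_inner (v : String) (pool : List (List (String × String))) (acc : Option (List (String × String))) :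
    pool.foldl (pvScanMin v) acc = (pool.filter (fun d => pvVer d == v)).foldl pvMinStep acc := by
  induction pool generalizing acc with
  | nil => rfl
  | cons a t ih =>
    rw [List.foldl_cons, scanMin_eq]
    by_cases hv : pvVer a = v
    · rw [List.filter_cons_of_pos (by simpa using hv), List.foldl_cons, if_pos hv, ih]
    · rw [List.filter_cons_of_neg (by simpa using hv), if_neg hv, ih]

lemma mem_wanted_none (devices : List (List (String × String))) (d : List (String × String))
    (hd : d ∈ devices) : pvVer d ∈ pvWanted devices none := by
  unfold pvWanted
  rw [PySem.List.mem_sorted, PySem.Set.mem_ofList]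
  exact List.mem_map.mpr ⟨d, hd, rfl⟩

lemma pool_filter_eq_group (devices : List (List (String × String))) (versions_wanted : Option (List String)) (v : String) :
    (pvPool devices versions_wanted).filter (fun d => pvVer d == v) =
      pvGroup (pvWanted devices versions_wanted) v devices := by
  cases versions_wanted with
  | none =>
    unfold pvPool pvGroup
    apply (List.filter_congr _).symm
    intro d hd
    simp [mem_wanted_none devices d hd]
  | some vs =>
    unfold pvPool pvGroup pvWanted
    rw [List.filter_filter]
    exact List.filter_congr (fun d _ => Bool.and_comm _ _)
  
lemma pool_map_ver (devices : List (List (String × String))) (versions_wanted : Option (List String)) :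
    (pvPool devices versions_wanted).map pvVer =
      ((devices.filter (fun x => decide (pvVer x ∈ pvWanted devices versions_wanted))).map pvVer) := by
  cases versions_wanted with
  | none =>
    unfold pvPool
    rw [List.filter_eq_self.mpr (fun d hd => by simp [mem_wanted_none devices d hd])]
  | some vs => rfl

lemma foldl_minStep_eq_min? (g : List (List (String × String))) :
    g.foldl pvMinStep none = PySem.List.min? g pvNameLen := by
  unfold PySem.List.min?
  congr 1
  funext acc x
  cases acc <;> rfl

lemma head?_insertBy (x : List (String × String)) (ys : List (List (String × String))) :
    (PySem.List.insertBy (fun a b => decide (pvNameLen a < pvNameLen b)) x ys).head? =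
      pvMinStep ys.head? x := by
  cases ys with
  | nil => simp [PySem.List.insertBy, pvMinStep]
  | cons c t =>
    simp only [PySem.List.insertBy, pvMinStep, List.head?_cons]
    split <;> simp_all

lemma head?_sorted_eq_min? (xs : List (List (String × String))) :
    (PySem.List.sorted xs pvNameLen).head? = PySem.List.min? xs pvNameLen := by
  rw [PySem.List.sorted_eq_foldl_insertBy, ← foldl_minStep_eq_min?]
  have aux : ∀ (l : List (List (String × String))) (ys : List (List (String × String))),
      (l.foldl (fun acc x => PySem.List.insertBy (fun a b => decide (pvNameLen a < pvNameLen b)) x acc) ys).head?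
        = l.foldl pvMinStep ys.head? := by
    intro l
    induction l with
    | nil => intro ys; rfl
    | cons x t ih =>
      intro ys
      rw [List.foldl_cons, List.foldl_cons, ih, head?_insertBy]
  simpa using aux xs []

lemma foldl_headMatch (F : String → List (List (String × String))) (G : String → List (String × String))
    (ks : List String) (acc : List (List (String × String)))
    (h : ∀ v ∈ ks, (F v).head? = some (G v)) :
    ks.foldl (fun selected version =>
      match F version with
      | c :: _ => selected ++ [c]
      | [] => selected) acc = acc ++ ks.map G := by
  induction ks generalizing acc with
  | nil => simp
  | cons a t ih =>
    have ha := h a (by simp)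
    rcases hF : F a with _ | ⟨c, r⟩
    · rw [hF] at ha; simp at ha
    · rw [hF] at ha
      simp only [List.head?_cons, Option.some.injEq] at ha
      rw [List.foldl_cons, hF, ih _ (fun v hv => h v (by simp [hv]))]
      simp [ha]

lemma foldl_someMatch (F : String → Option (List (String × String))) (G : String → List (String × String))
    (ks : List String) (acc : List (List (String × String)))
    (h : ∀ v ∈ ks, F v = some (G v)) :
    ks.foldl (fun selected v =>
      match F v with
      | some best => selected ++ [best]
      | none => selected) acc = acc ++ ks.map G := by
  induction ks generalizing acc with
  | nil => simp
  | cons a t ih =>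
    rw [List.foldl_cons, h a (by simp), ih _ (fun v hv => h v (by simp [hv]))]
    simp

lemma group_ne_nil (vw : List String) (l : List (List (String × String))) (v : String)
    (hv : v ∈ (l.filter (fun x => decide (pvVer x ∈ vw))).map pvVer) :
    pvGroup vw v l ≠ [] := by
  obtain ⟨x, hx, hxv⟩ := List.mem_map.mp hv
  obtain ⟨hxl, hxw⟩ := List.mem_filter.mp hx
  apply List.ne_nil_of_mem (a := x)
  unfold pvGroup
  exact List.mem_filter.mpr ⟨hxl, by simp_all⟩

-- ===== VERDICT (by name: the statement is the Claim_ definition above) =====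
theorem select_devices_by_version_spec : Claim_equal_select_devices_by_version := by
  intro devices versions_wanted _hdom _hpre
  unfold Spec_select_devices_by_version
  simp only [select_devices_by_version, select_devices_by_version_alt]
  rw [a_fold_keys, PySem.Dict.keys_empty, PySem.Set.update_nil_left, pool_map_ver]
  set vw := pvWanted devices versions_wanted with hvw
  set S := PySem.List.sorted (PySem.Set.ofList ((devices.filter (fun x => decide (pvVer x ∈ vw))).map pvVer)) (fun v => v) with hS
  set G : String → List (String × String) := fun v => (PySem.List.min? (pvGroup vw v devices) pvNameLen).getD [] with hG
  have hmemS : ∀ v ∈ S, pvGroup vw v devices ≠ [] := by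
    intro v hvS
    apply group_ne_nil
    rw [hS] at hvS
    exact (PySem.Set.mem_ofList _ _).mp ((PySem.List.mem_sorted _ _ _ _).mp hvS)
  have hGsome : ∀ v ∈ S, PySem.List.min? (pvGroup vw v devices) pvNameLen = some (G v) := by
    intro v hvS
    rcases hmin : PySem.List.min? (pvGroup vw v devices) pvNameLen with _ | m
    · exact absurd ((PySem.List.min?_eq_none_iff _ _).mp hmin) (hmemS v hvS)
    · rw [hG]; simp [hmin]
  have hA : S.foldl (fun selected version =>
      match PySem.List.sorted ((devices.foldl (pvStepA vw) PySem.Dict.empty).getD version []) pvNameLen with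
      | c :: _ => selected ++ [c]
      | [] => selected) [] = [] ++ S.map G := by
    apply foldl_headMatch
    intro v hvS
    rw [a_fold_getD, PySem.Dict.getD_empty, List.nil_append, head?_sorted_eq_min?]
    exact hGsome v hvS
  have hB : S.foldl (fun selected v =>
      match (pvPool devices versions_wanted).foldl (pvScanMin v) none with
      | some best => selected ++ [best]
      | none => selected) [] = [] ++ S.map G := by
    apply foldl_someMatch
    intro v hvS
    rw [b_inner, pool_filter_eq_group, ← hvw, foldl_minStep_eq_min?]
    exact hGsome v hvS
  rw [hA, hB]
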